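-- pv_equiv track=rewrite | github.com/DeveloperAhn/kt-test | binary_serch.py | solution
-- ===== SOURCE A (Python) =====
-- def binary_serch(a,key):
--     start=0
--     end=len(a)-1
--
--     while start<=end:
--         mid=(start+end)//2
--         if a[mid]==key:
--             return mid
--         elif a[mid]<key:
--             start=mid+1
--         else:
--             end=mid-1
--     return -1
--
-- def solution(store, customer):
--     answer = []
--     for i in range(len(customer)):
--         if binary_serch(store,customer[i])!=-1:
--             answer.append('Yes')
--         else:
--             answer.append('No')
--     return answer
-- ===== SOURCE B (Python) =====
-- def solution(store, customer):
--     def search(lo, hi, key):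
--         if lo > hi:
--             return -1
--         mid = (lo + hi) // 2
--         if store[mid] == key:
--             return mid
--         if store[mid] < key:
--             return search(mid + 1, hi, key)
--         return search(lo, mid - 1, key)
--
--     memo = {}
--     for c in customer:
--         if c not in memo:
--             memo[c] = 'Yes' if search(0, len(store) - 1, c) != -1 else 'No'
--     return [memo[c] for c in customer]
-- ===== Notes on version B (the rewrite author's own statement) =====
-- stated objective: alternative
-- what changed: Replaces the iterative while-loop binary search run once per customer with a recursive divide-and-conquer search (same mid formula and comparison order) plus a memo dict so each distinct customer value is searched only once, and the answer list is produced by a comprehension over the memo instead of an index loop with appends.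
import Mathlib
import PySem

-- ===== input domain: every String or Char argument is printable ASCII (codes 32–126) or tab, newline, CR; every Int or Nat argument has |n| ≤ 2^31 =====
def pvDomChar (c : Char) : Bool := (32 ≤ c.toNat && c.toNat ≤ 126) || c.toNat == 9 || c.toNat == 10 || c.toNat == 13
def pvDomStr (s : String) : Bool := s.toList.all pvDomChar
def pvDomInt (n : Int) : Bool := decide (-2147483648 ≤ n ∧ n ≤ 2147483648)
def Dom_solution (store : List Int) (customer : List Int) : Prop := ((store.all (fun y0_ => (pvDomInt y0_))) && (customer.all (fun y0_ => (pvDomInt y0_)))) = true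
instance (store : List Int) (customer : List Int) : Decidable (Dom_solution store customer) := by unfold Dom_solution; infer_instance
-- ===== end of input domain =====

-- B re-decomposes A: a recursive divide-and-conquer search (same mid formula and comparison
-- order) memoised per distinct customer value in a dict, answers read back by a comprehension.

-- ===== PORT A =====
-- the while-loop of binary_serch; fuel (never exhausted: the interval shrinks each pass)
-- and pyGetD's default 0 only totalise it (mid stays in range)
def pvLoopA (a : List Int) (key : Int) (fuel : Nat) (start stop : Int) : Int :=
  match fuel with
  | 0 => -1
  | fuel + 1 =>
    if start ≤ stop then
      let mid := PySem.Int.floordiv (start + stop) 2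
      if PySem.List.pyGetD a mid 0 = key then mid
      else if PySem.List.pyGetD a mid 0 < key then pvLoopA a key fuel (mid + 1) stop
      else pvLoopA a key fuel start (mid - 1)
    else -1

def binary_serch (a : List Int) (key : Int) : Int :=
  pvLoopA a key (a.length + 1) 0 ((a.length : Int) - 1)

def solution (store : List Int) (customer : List Int) : List String :=
  (PySem.List.pyRange 0 (customer.length : Int) 1).foldl
    (fun answer i =>
      if binary_serch store (PySem.List.pyGetD customer i 0) ≠ -1 then answer ++ ["Yes"]
      else answer ++ ["No"]) []

-- ===== PORT B =====
-- recursive search of Source B; fuel (never exhausted) and pyGetD's default 0 only totalise it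
def pvSearchB (store : List Int) (fuel : Nat) (lo hi : Int) (key : Int) : Int :=
  match fuel with
  | 0 => -1
  | fuel + 1 =>
    if lo > hi then -1
    else
      let mid := PySem.Int.floordiv (lo + hi) 2
      if PySem.List.pyGetD store mid 0 = key then mid
      else if PySem.List.pyGetD store mid 0 < key then pvSearchB store fuel (mid + 1) hi key
      else pvSearchB store fuel lo (mid - 1) key

def solution_alt (store : List Int) (customer : List Int) : List String :=
  let memo : PySem.Dict Int String :=
    customer.foldl
      (fun d c =>
        if d.contains c then d
        else d.insert c
          (if pvSearchB store (store.length + 1) 0 ((store.length : Int) - 1) c ≠ -1 then "Yes" else "No"))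
      PySem.Dict.empty
  customer.map (fun c => memo.getD c "")  -- memo[c]; default "" only totalises (c is always a key)

-- ===== PRECONDITION & SPEC =====
def Spec_solution (store : List Int) (customer : List Int) (out : List String) : Prop := out = solution_alt store customer
instance (store : List Int) (customer : List Int) (out : List String) : Decidable (Spec_solution store customer out) := by unfold Spec_solution; infer_instance

-- ===== CLAIM (what is proved, stated in full; the proofs are below) =====
def Claim_equal_solution : Prop := ∀ (store : List Int) (customer : List Int), Dom_solution store customer → Spec_solution store customer (solution store customer)

-- ===== LEMMAS AND PROOFS =====

-- the two searches agree everywhere (same midpoints, same comparisons, same fuel)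
lemma searchEq (a : List Int) (key : Int) (fuel : Nat) (lo hi : Int) :
    pvLoopA a key fuel lo hi = pvSearchB a fuel lo hi key := by
  induction fuel generalizing lo hi with
  | zero => rfl
  | succ fuel ih =>
      rw [pvLoopA, pvSearchB]
      by_cases h : lo ≤ hi
      · have h2 : ¬ lo > hi := by omega
        rw [if_pos h, if_neg h2]
        simp only []
        split_ifs <;> simp only [ih]
      · have h2 : lo > hi := by omega
        rw [if_neg h, if_pos h2]

-- the answer 'Yes'/'No' for one customer value, via B's search
def pvAns (store : List Int) (c : Int) : String :=
  if pvSearchB store (store.length + 1) 0 ((store.length : Int) - 1) c ≠ -1 then "Yes" else "No"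

-- the body of B's memo-building loop
def pvStep (store : List Int) (d : PySem.Dict Int String) (c : Int) : PySem.Dict Int String :=
  if d.contains c then d else d.insert c (pvAns store c)

lemma memo_sound (store : List Int) (l : List Int) (d : PySem.Dict Int String)
    (hd : ∀ k v, d.get? k = some v → v = pvAns store k) :
    ∀ k v, (l.foldl (pvStep store) d).get? k = some v → v = pvAns store k := by
  induction l generalizing d with
  | nil => exact hd
  | cons a l ih =>
      intro k v
      simp only [List.foldl_cons]
      apply ih
      intro k v hv
      unfold pvStep at hv
      split at hv
      · exact hd k v hv
      · rw [PySem.Dict.get?_insert] at hv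
        split at hv
        · cases hv; subst k; rfl
        · exact hd k v hv

lemma memo_mono (store : List Int) (l : List Int) (d : PySem.Dict Int String) (c : Int)
    (hc : d.contains c = true) : (l.foldl (pvStep store) d).contains c = true := by
  induction l generalizing d with
  | nil => exact hc
  | cons a l ih =>
      simp only [List.foldl_cons]
      apply ih
      unfold pvStep
      split
      · exact hc
      · rw [PySem.Dict.contains_insert, hc]; simp

lemma memo_contains (store : List Int) (l : List Int) (d : PySem.Dict Int String) (c : Int)
    (hc : c ∈ l) : (l.foldl (pvStep store) d).contains c = true := by
  induction l generalizing d with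
  | nil => cases hc
  | cons a l ih =>
      simp only [List.foldl_cons]
      rcases List.mem_cons.mp hc with h | h
      · subst h
        apply memo_mono
        unfold pvStep
        split
        · assumption
        · exact PySem.Dict.contains_insert_self _ _ _
      · exact ih _ h

-- solution_alt, with its two inline lambdas named (definitional)
lemma alt_eq (store customer : List Int) :
    solution_alt store customer =
      customer.map (fun c => (customer.foldl (pvStep store) PySem.Dict.empty).getD c "") := rfl

lemma final (store customer : List Int) : solution store customer = solution_alt store customer := by
  unfold solution
  rw [alt_eq]
  have h1 : (fun (answer : List String) (i : Int) =>
      if binary_serch store (PySem.List.pyGetD customer i 0) ≠ -1 then answer ++ ["Yes"]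
      else answer ++ ["No"]) =
      (fun (answer : List String) (i : Int) =>
        answer ++ [pvAns store (PySem.List.pyGetD customer i 0)]) := by
    funext answer i
    unfold pvAns binary_serch
    rw [searchEq]
    split <;> rfl
  rw [h1]
  rw [PySem.List.foldl_pyRange_zero_pyGetD' customer 0
    (fun (acc : List String) (c : Int) => acc ++ [pvAns store c]) []]
  rw [PySem.List.foldl_append_singleton_eq_map]
  simp only [List.nil_append]
  apply List.map_congr_left
  intro c hc
  have hcont := memo_contains store customer PySem.Dict.empty c hc
  rw [PySem.Dict.contains_eq_isSome_get?] at hcont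
  obtain ⟨v, hv⟩ := Option.isSome_iff_exists.mp hcont
  have := memo_sound store customer PySem.Dict.empty
    (by intro k v h; rw [PySem.Dict.get?_empty] at h; cases h) c v hv
  rw [PySem.Dict.getD_of_get?_eq_some (h := hv), this]

-- ===== VERDICT (by name: the statement is the Claim_ definition above) =====
theorem solution_spec : Claim_equal_solution := by
  intro store customer _
  exact final store customer
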